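-- pv_equiv track=rewrite | github.com/Gyaha/AOC2020 | day_20_b.py | check_map_for_monster
-- ===== SOURCE A (Python) =====
-- def check_map_for_monster(mp: list, monster: list) -> list:
--     mh, mw = len(mp), len(mp[0])
--     found = [[[], []] for r in range(4)]
--     for y in range(mh):
--         for x in range(mw):
--             for r in range(4):
--                 for f in range(2):
--                     if find_monster(mp, monster[r + (4 if f else 0)], y, x):
--                         found[r][f].append([y, x])
--     return found
--
-- def find_monster(mp: list, monster: list, y: int, x: int):
--     mh, mw = len(monster), len(monster[0])
--     for my in range(mh):
--         for mx in range(mw):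
--             try:
--                 if monster[my][mx]:
--                     if not mp[y + my][x + mx] == "#":
--                         return False
--             except:
--                 return False
--     return True
-- ===== SOURCE B (Python) =====
-- def check_map_for_monster(mp: list, monster: list) -> list:
--     mh, mw = len(mp), len(mp[0])
--     found = [[[], []] for _ in range(4)]
--     coords = [[(my, mx) for my, row in enumerate(o) for mx, c in enumerate(row) if c]
--               for o in monster]
--     for y in range(mh):
--         for x in range(mw):
--             for r in range(4):
--                 for f in range(2):
--                     if all(y + dy < mh and x + dx < mw and mp[y + dy][x + dx] == "#"
--                            for dy, dx in coords[r + 4 * f]):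
--                         found[r][f].append([y, x])
--     return found
-- ===== Notes on version B (the rewrite author's own statement) =====
-- stated objective: idiomatic
-- what changed: B precomputes, once per call, each orientation's list of live-cell (dy,dx) offsets and tests a position with explicit bounds checks over only those offsets, instead of re-scanning the whole bounding box with a try/except at every position; Pre_ excludes the inputs where A raises (empty map; with a nonempty first row, fewer than 8 orientations or an empty one) and ragged maps/orientations, where A's bare except silently turns out-of-row accesses into non-matches while B either raises or inspects the full rows.
import Mathlib
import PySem

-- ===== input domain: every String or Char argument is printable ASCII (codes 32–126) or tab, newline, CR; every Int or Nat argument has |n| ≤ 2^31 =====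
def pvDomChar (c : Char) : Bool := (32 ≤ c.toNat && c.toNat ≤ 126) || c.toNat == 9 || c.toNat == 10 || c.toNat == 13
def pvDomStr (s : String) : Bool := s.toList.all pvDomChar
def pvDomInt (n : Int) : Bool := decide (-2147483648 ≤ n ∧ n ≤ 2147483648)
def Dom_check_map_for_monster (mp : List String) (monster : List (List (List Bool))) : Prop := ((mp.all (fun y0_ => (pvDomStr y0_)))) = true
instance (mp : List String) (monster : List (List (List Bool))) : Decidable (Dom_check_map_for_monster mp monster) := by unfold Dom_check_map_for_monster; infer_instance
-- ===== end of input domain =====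

-- B replaces A's per-position try/except bounding-box scan by a one-off table of each
-- orientation's live-cell offsets checked against the grid bounds (objective: idiomatic).

-- ===== PORT A =====
-- found[r][f].append(v)  (nested list mutation, r and f in range by construction)
def appendFound (found : List (List (List (List Int)))) (r f : Nat) (v : List Int) :
    List (List (List (List Int))) :=
  found.modify r (fun g => g.modify f (fun l => l ++ [v]))

-- literal port of find_monster: the bare 'except' around the body returns False on any
-- IndexError, which the 'none' branches of pyGet? reproduce exactly
def findMonster (mp : List String) (monster : List (List Bool)) (y x : Int) : Bool :=
  let mh : Int := monster.length
  let mw : Int := ((PySem.List.pyGet? monster 0).getD []).length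
  (PySem.List.pyRange 0 mh 1).all (fun my =>
    (PySem.List.pyRange 0 mw 1).all (fun mx =>
      match PySem.List.pyGet? monster my with
      | none => false
      | some row =>
        match PySem.List.pyGet? row mx with
        | none => false
        | some c =>
          if c then
            match PySem.List.pyGet? mp (y + my) with
            | none => false
            | some s =>
              match PySem.Str.pyGet? s (x + mx) with
              | none => false
              | some ch => ch == '#'
          else true))

def check_map_for_monster (mp : List String) (monster : List (List (List Bool))) : List (List (List (List Int))) :=
  let mh : Int := mp.length
  let mw : Int := PySem.Str.len ((PySem.List.pyGet? mp 0).getD "")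
  let found : List (List (List (List Int))) := (PySem.List.pyRange 0 4 1).map (fun _ => [[], []])
  (PySem.List.pyRange 0 mh 1).foldl (fun found y =>
    (PySem.List.pyRange 0 mw 1).foldl (fun found x =>
      (PySem.List.pyRange 0 4 1).foldl (fun found r =>
        (PySem.List.pyRange 0 2 1).foldl (fun found f =>
          if findMonster mp ((PySem.List.pyGet? monster (r + if f ≠ 0 then 4 else 0)).getD []) y x then
            appendFound found r.toNat f.toNat [y, x]
          else found) found) found) found) found

-- ===== PORT B =====
-- the (dy, dx) of an orientation's live cells
def orientCoords (mo : List (List Bool)) : List (Int × Int) :=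
  (PySem.List.enumerate mo).flatMap (fun p =>
    (PySem.List.enumerate p.2).filterMap (fun q =>
      if q.2 then some (p.1, q.1) else none))

-- all(y+dy < mh and x+dx < mw and mp[y+dy][x+dx] == "#" for dy, dx in offs); the
-- lookup's getD is unreachable when the preceding bound tests hold (rectangular map)
def monsterAt (mp : List String) (mh mw y x : Int) (offs : List (Int × Int)) : Bool :=
  offs.all (fun d =>
    decide (y + d.1 < mh) && decide (x + d.2 < mw) &&
    (PySem.Str.pyGet? ((PySem.List.pyGet? mp (y + d.1)).getD "") (x + d.2) == some '#'))

def check_map_for_monster_alt (mp : List String) (monster : List (List (List Bool))) : List (List (List (List Int))) :=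
  let mh : Int := mp.length
  let mw : Int := PySem.Str.len ((PySem.List.pyGet? mp 0).getD "")
  let found : List (List (List (List Int))) := (PySem.List.pyRange 0 4 1).map (fun _ => [[], []])
  let coords : List (List (Int × Int)) := monster.map orientCoords
  (PySem.List.pyRange 0 mh 1).foldl (fun found y =>
    (PySem.List.pyRange 0 mw 1).foldl (fun found x =>
      (PySem.List.pyRange 0 4 1).foldl (fun found r =>
        (PySem.List.pyRange 0 2 1).foldl (fun found f =>
          if monsterAt mp mh mw y x ((PySem.List.pyGet? coords (r + 4 * f)).getD []) then
            appendFound found r.toNat f.toNat [y, x]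
          else found) found) found) found) found

-- ===== PRECONDITION & SPEC =====
-- Pre_ excludes the inputs on which Python A raises IndexError (empty map; with a nonempty
-- first row, fewer than 8 orientations or an empty one among the first 8) and, with a
-- nonempty first row, ragged maps or ragged first-8 orientations, on which A's bare except
-- silently turns out-of-row accesses into non-matches while B either raises or inspects the
-- full rows — the function's natural domain is rectangular grids.
def Pre_check_map_for_monster (mp : List String) (monster : List (List (List Bool))) : Prop :=
  mp ≠ [] ∧ (PySem.Str.len (mp.headD "") = 0 ∨
    ((∀ s ∈ mp, PySem.Str.len s = PySem.Str.len (mp.headD "")) ∧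
     8 ≤ monster.length ∧
     ∀ o ∈ monster.take 8, o ≠ [] ∧ ∀ row ∈ o, row.length = (o.headD []).length))
instance (mp : List String) (monster : List (List (List Bool))) : Decidable (Pre_check_map_for_monster mp monster) := by unfold Pre_check_map_for_monster; infer_instance

def pvWitness_check_map_for_monster : List String × List (List (List Bool)) :=
  (["##", "#."], [[[true]], [[true]], [[true]], [[true]], [[true]], [[true]], [[true]], [[true]]])

def Spec_check_map_for_monster (mp : List String) (monster : List (List (List Bool))) (out : List (List (List (List Int)))) : Prop := out = check_map_for_monster_alt mp monster
instance (mp : List String) (monster : List (List (List Bool))) (out : List (List (List (List Int)))) : Decidable (Spec_check_map_for_monster mp monster out) := by unfold Spec_check_map_for_monster; infer_instance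

-- ===== CLAIM (what is proved, stated in full; the proofs are below) =====
def Claim_equal_check_map_for_monster : Prop := ∀ (mp : List String) (monster : List (List (List Bool))), Dom_check_map_for_monster mp monster → Pre_check_map_for_monster mp monster → Spec_check_map_for_monster mp monster (check_map_for_monster mp monster)

-- ===== LEMMAS AND PROOFS =====

-- A's cell access equals B's bounds-checked lookup on a rectangular map of width mw
theorem pv_cell_eq (mp : List String) (mw : Int)
    (hrect : ∀ s ∈ mp, PySem.Str.len s = mw) (t u : Int) (ht : 0 ≤ t) (hu : 0 ≤ u) :
    (match PySem.List.pyGet? mp t with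
     | none => false
     | some s =>
       match PySem.Str.pyGet? s u with
       | none => false
       | some ch => ch == '#') =
    (decide (t < (mp.length : Int)) && decide (u < mw) &&
     (PySem.Str.pyGet? ((PySem.List.pyGet? mp t).getD "") u == some '#')) := by
  by_cases hlt : t < (mp.length : Int)
  · rw [PySem.List.pyGet?_eq_some_getElem mp ht hlt]
    have hlen : PySem.Str.len mp[t.toNat] = mw :=
      hrect _ (List.getElem_mem (by omega))
    have hlen2 : PySem.Str.len mp[t.toNat] = (mp[t.toNat].toList.length : Int) :=
      PySem.Str.len_eq _
    have hget : PySem.List.pyGet? mp[t.toNat].toList u = mp[t.toNat].toList[u.toNat]? := by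
      conv_lhs => rw [show u = ((u.toNat : Nat) : Int) from by omega]
      rw [PySem.List.pyGet?_natCast]
    by_cases hu2 : u < mw
    · have hidx : u.toNat < mp[t.toNat].toList.length := by omega
      rcases hg : mp[t.toNat].toList[u.toNat]? with _ | ch
      · exact absurd (List.getElem?_eq_some_iff.mpr ⟨hidx, rfl⟩) (by simp [hg])
      · simp [hget, hg, hlt, hu2]
    · have hnone : mp[t.toNat].toList[u.toNat]? = none := by
        rw [List.getElem?_eq_none_iff]; omega
      simp [hget, hnone, hu2]
  · have hn : PySem.List.pyGet? mp t = none := by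
      rw [PySem.List.pyGet?_eq_none_iff]
      simp only [PySem.Raise.InRange]
      omega
    simp [hn, hlt, PySem.Str.pyGet?]

-- A's box scan of a rectangular orientation equals B's offset test
theorem pv_orient_eq (mp : List String) (mw : Int)
    (hrect : ∀ s ∈ mp, PySem.Str.len s = mw)
    (mo : List (List Bool)) (w : Nat)
    (hw : w = ((PySem.List.pyGet? mo 0).getD []).length)
    (hmo : ∀ row ∈ mo, row.length = w) (y x : Int) (hy : 0 ≤ y) (hx : 0 ≤ x) :
    findMonster mp mo y x = monsterAt mp mp.length mw y x (orientCoords mo) := by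
  unfold findMonster monsterAt orientCoords
  rw [← hw]
  rw [Bool.eq_iff_iff]
  simp only [List.all_eq_true, PySem.List.mem_pyRange_one]
  constructor
  · intro h d hd
    obtain ⟨p, hp, hd2⟩ := List.mem_flatMap.mp hd
    obtain ⟨k, hk, hpk⟩ := (PySem.List.mem_enumerate_iff mo 0 p).mp hp
    subst hpk
    obtain ⟨q, hq, hqj⟩ := List.mem_filterMap.mp hd2
    obtain ⟨j, hj, hqd⟩ := (PySem.List.mem_enumerate_iff _ 0 q).mp hq
    subst hqd
    simp only at hqj
    have hlive : mo[k][j] = true := by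
      by_contra hc
      rw [Bool.not_eq_true] at hc
      simp [hc] at hqj
    rw [hlive, if_pos rfl] at hqj
    have hd3 : d = ((0 + (k:Int)), (0 + (j:Int))) := by cases hqj; rfl
    subst hd3
    have hj' : j < mo[k].length := by simpa using hj
    have hjw : j < w := by rw [← hmo _ (List.getElem_mem hk)]; exact hj' 
    have hP := h (k : Int) ⟨by omega, by omega⟩ (j : Int) ⟨by omega, by omega⟩
    have hA : PySem.List.pyGet? mo ((k:Nat) : Int) = some mo[k] := by
      rw [PySem.List.pyGet?_eq_some_getElem mo (by omega) (by omega)]; simp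
    have hB : PySem.List.pyGet? mo[k] ((j:Nat) : Int) = some mo[k][j] := by
      rw [PySem.List.pyGet?_eq_some_getElem _ (by omega) (by omega)]; simp
    simp only [hA, hB, hlive, if_true] at hP
    have hcell := pv_cell_eq mp mw hrect (y + (k:Int)) (x + (j:Int)) (by omega) (by omega)
    simp only [hcell] at hP
    simpa using hP
  · intro h my hmy mx hmx
    obtain ⟨hmy0, hmyl⟩ := hmy
    obtain ⟨hmx0, hmxl⟩ := hmx
    have hkk : my.toNat < mo.length := by omega
    have hA : PySem.List.pyGet? mo my = some mo[my.toNat] := by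
      rw [PySem.List.pyGet?_eq_some_getElem mo (by omega) (by omega)]
    have hwrow : mo[my.toNat].length = w := hmo _ (List.getElem_mem hkk)
    have hjj : mx.toNat < mo[my.toNat].length := by omega
    have hB : PySem.List.pyGet? mo[my.toNat] mx = some mo[my.toNat][mx.toNat] := by
      rw [PySem.List.pyGet?_eq_some_getElem _ (by omega) (by omega)]
    rw [hA]
    by_cases hc : mo[my.toNat][mx.toNat] = true
    · simp only [hB, hc, if_true]
      have hdmem : (my, mx) ∈ (PySem.List.enumerate mo).flatMap (fun p =>
          (PySem.List.enumerate p.2).filterMap (fun q =>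
            if q.2 then some (p.1, q.1) else none)) := by
        apply List.mem_flatMap.mpr
        refine ⟨((my.toNat : Int), mo[my.toNat]), ?_, ?_⟩
        · rw [PySem.List.mem_enumerate_iff]
          exact ⟨my.toNat, hkk, by simp⟩
        · apply List.mem_filterMap.mpr
          refine ⟨((mx.toNat : Int), mo[my.toNat][mx.toNat]), ?_, ?_⟩
          · rw [PySem.List.mem_enumerate_iff]
            exact ⟨mx.toNat, hjj, by simp⟩
          · simp [hc]
            exact ⟨hmy0, hmx0⟩
      have hQ := h (my, mx) hdmem
      have hcell := pv_cell_eq mp mw hrect (y + my) (x + mx) (by omega) (by omega)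
      rw [hcell]
      simpa using hQ
    · rw [Bool.not_eq_true] at hc
      simp [hB, hc]

theorem pv_head_eq (mp : List String) : (PySem.List.pyGet? mp 0).getD "" = mp.headD "" := by
  cases mp with
  | nil => rfl
  | cons a l => rw [PySem.List.pyGet?_zero_cons]; rfl

theorem pv_mo_head (mo : List (List Bool)) : mo.headD [] = (PySem.List.pyGet? mo 0).getD [] := by
  cases mo with
  | nil => rfl
  | cons a l => rw [PySem.List.pyGet?_zero_cons]; rfl

-- ===== VERDICT (by name: the statement is the Claim_ definition above) =====
theorem check_map_for_monster_spec : Claim_equal_check_map_for_monster := by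
  intro mp monster _ hpre
  unfold Spec_check_map_for_monster check_map_for_monster check_map_for_monster_alt
  dsimp only
  by_cases h0 : PySem.Str.len ((PySem.List.pyGet? mp 0).getD "") = 0
  · have hr : PySem.List.pyRange 0 (PySem.Str.len ((PySem.List.pyGet? mp 0).getD "")) 1 = [] := by
      rw [h0]; exact PySem.List.pyRange_one_eq_nil le_rfl
    simp only [hr, List.foldl_nil]
  · obtain ⟨hne, hcase⟩ := hpre
    rcases hcase with hlen0 | ⟨hmpw, h8, hmon⟩
    · exact absurd (by rw [pv_head_eq]; exact hlen0) h0
    have hhead : PySem.Str.len ((PySem.List.pyGet? mp 0).getD "") = PySem.Str.len (mp.headD "") := by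
      rw [pv_head_eq]
    have hmem0 : mp.headD "" ∈ mp := by
      cases mp with
      | nil => exact absurd rfl hne
      | cons a l => exact List.mem_cons_self
    apply PySem.List.foldl_congr_mem'
    intro y hymem acc1
    have hy : 0 ≤ y := (PySem.List.mem_pyRange_one.mp hymem).1
    apply PySem.List.foldl_congr_mem'
    intro x hxmem acc2
    have hx : 0 ≤ x := (PySem.List.mem_pyRange_one.mp hxmem).1
    apply PySem.List.foldl_congr_mem'
    intro r hrmem acc3
    obtain ⟨hr0, hr1⟩ := PySem.List.mem_pyRange_one.mp hrmem
    apply PySem.List.foldl_congr_mem'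
    intro f hfmem acc4
    obtain ⟨hf0, hf1⟩ := PySem.List.mem_pyRange_one.mp hfmem
    have hidx : (if f ≠ 0 then (4:Int) else 0) = 4 * f := by
      interval_cases f <;> norm_num
    rw [hidx]
    have hnat : (r + 4 * f).toNat < 8 := by omega
    have hAidx : PySem.List.pyGet? monster (r + 4 * f)
        = some (monster[(r + 4 * f).toNat]) := by
      rw [PySem.List.pyGet?_eq_some_getElem _ (by omega) (by omega)]
    have hBidx : PySem.List.pyGet? (monster.map orientCoords) (r + 4 * f)
        = some (orientCoords monster[(r + 4 * f).toNat]) := by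
      rw [PySem.List.pyGet?_eq_some_getElem _ (by omega) (by simpa using (by omega : (r + 4 * f) < (monster.length : Int)))]
      rw [List.getElem_map]
    simp only [hAidx, hBidx, Option.getD_some]
    have hmemtake : monster[(r + 4 * f).toNat] ∈ monster.take 8 := by
      rw [show monster[(r + 4 * f).toNat] = (monster.take 8)[(r + 4 * f).toNat]'(by simp [List.length_take]; omega) from (List.getElem_take).symm]
      exact List.getElem_mem _
    obtain ⟨hone, hrows⟩ := hmon _ hmemtake
    have hw : (monster[(r + 4 * f).toNat].headD []).length
        = ((PySem.List.pyGet? monster[(r + 4 * f).toNat] 0).getD []).length := by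
      rw [pv_mo_head]
    have hrect : ∀ s ∈ mp, PySem.Str.len s = PySem.Str.len ((PySem.List.pyGet? mp 0).getD "") := by
      intro s hs; rw [hhead]; exact hmpw s hs
    simp only [pv_orient_eq mp _ hrect monster[(r + 4 * f).toNat]
      ((monster[(r + 4 * f).toNat].headD []).length) hw
      (fun row hr => hrows row hr) y x hy hx]
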